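-- pv_equiv track=rewrite | github.com/mayurandhare13/coding-pattern | 20. DCP/dcp_040.py | singleNumber5
-- ===== SOURCE A (Python) =====
-- def singleNumber5(nums: list) -> int:
--     # 2^m >= k
--     # 2^3 >= 5 --> x1, x2, x3
--     # when x1, x2, x3 becomes k. reset the counter using mask
--     # k = 5 --> 101  --> mask = ~(x1 & ~x2 & x3)
--
--     x1, x2, x3 = 0, 0, 0
--
--     for num in nums:
--         x3 ^= x2 & x1 & num
--         x2 ^= x1 & num
--         x1 ^= num
--
--         mask = ~(x1 & ~x2 & x3)
--         x3 &= mask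
--         x2 &= mask
--         x1 &= mask
--
--     return x1 | x2 | x3
-- ===== SOURCE B (Python) =====
-- def singleNumber5(nums: list) -> int:
--     # Per-bit tally: a bit of the answer is set iff the number of inputs with that
--     # bit set is not a multiple of 5.  Bits 0..31 are counted directly; all higher
--     # bits of a 32-bit-range int equal its sign, so they are sign-extended from the
--     # count of negative inputs.
--     neg = sum(n < 0 for n in nums)
--     res = 0
--     for i in range(32):
--         if sum((n >> i) & 1 for n in nums) % 5:
--             res |= 1 << i
--     if neg % 5:
--         res |= -1 << 32
--     return res
-- ===== Notes on version B (the rewrite author's own statement) =====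
-- stated objective: alternative
-- what changed: Replaced the three-register mod-5 finite-state machine over whole-word bitops by an explicit per-bit frequency tally: count, for each of the 32 value bits, how many inputs have that bit set, set the answer bit when the count mod 5 is nonzero, and sign-extend from the count of negative inputs.
import Mathlib
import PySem

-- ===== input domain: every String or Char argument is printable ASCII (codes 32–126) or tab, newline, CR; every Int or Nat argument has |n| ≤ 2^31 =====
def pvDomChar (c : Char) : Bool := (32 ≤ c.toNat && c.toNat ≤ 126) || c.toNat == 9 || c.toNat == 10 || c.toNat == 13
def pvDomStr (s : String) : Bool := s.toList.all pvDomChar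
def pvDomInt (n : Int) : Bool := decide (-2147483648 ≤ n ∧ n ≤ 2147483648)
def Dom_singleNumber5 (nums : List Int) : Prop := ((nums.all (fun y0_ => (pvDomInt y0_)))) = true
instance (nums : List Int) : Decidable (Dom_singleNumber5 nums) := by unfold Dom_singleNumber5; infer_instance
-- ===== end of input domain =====

-- B replaces A's three-register mod-5 state machine by a per-bit set-bit tally (count mod 5,
-- sign-extended above bit 31): an alternative algorithm of similar cost, not claimed faster.

-- ===== PORT A =====
-- one iteration of A's loop body over the three registers
def pvStepA (st : Int × Int × Int) (num : Int) : Int × Int × Int :=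
  let x3 := PySem.Int.bxor st.2.2 (PySem.Int.band (PySem.Int.band st.2.1 st.1) num)
  let x2 := PySem.Int.bxor st.2.1 (PySem.Int.band st.1 num)
  let x1 := PySem.Int.bxor st.1 num
  let mask := Int.not (PySem.Int.band (PySem.Int.band x1 (Int.not x2)) x3)
  (PySem.Int.band x1 mask, PySem.Int.band x2 mask, PySem.Int.band x3 mask)

def singleNumber5 (nums : List Int) : Int :=
  let st := nums.foldl pvStepA (0, 0, 0)
  PySem.Int.bor (PySem.Int.bor st.1 st.2.1) st.2.2

-- ===== PORT B =====
-- sum((n >> i) & 1 for n in nums)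
def pvBitSum (nums : List Int) (i : Nat) : Int :=
  (nums.map (fun (n : Int) => PySem.Int.band (n >>> i) 1)).sum

-- body of B's `for i in range(32)` loop
def pvResF (nums : List Int) (res : Int) (i : Nat) : Int :=
  if PySem.Int.mod (pvBitSum nums i) 5 ≠ 0 then PySem.Int.bor res ((1 : Int) <<< i) else res

def singleNumber5_alt (nums : List Int) : Int :=
  let neg : Int := (nums.map (fun n => if n < 0 then (1 : Int) else 0)).sum
  let res : Int := (List.range 32).foldl (pvResF nums) 0
  if PySem.Int.mod neg 5 ≠ 0 then PySem.Int.bor res ((-1) <<< 32) else res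

-- ===== PRECONDITION & SPEC =====
def Spec_singleNumber5 (nums : List Int) (out : Int) : Prop := out = singleNumber5_alt nums
instance (nums : List Int) (out : Int) : Decidable (Spec_singleNumber5 nums out) := by unfold Spec_singleNumber5; infer_instance

-- ===== CLAIM (what is proved, stated in full; the proofs are below) =====
def Claim_equal_singleNumber5 : Prop := ∀ (nums : List Int), Dom_singleNumber5 nums → Spec_singleNumber5 nums (singleNumber5 nums)

-- ===== LEMMAS AND PROOFS =====

-- testBit on the Int constructors / casts
lemma pvTbCoe (m : Nat) (k : Nat) : (Int.ofNat m).testBit k = m.testBit k := rfl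

lemma pvTbNegSucc (m : Nat) (k : Nat) : (Int.negSucc m).testBit k = !(m.testBit k) := rfl

lemma pvNegSuccCast (x : Nat) : -(x : Int) - 1 = Int.negSucc x := by
  rw [Int.negSucc_eq]; ring

lemma pvOfNatCast (m : Nat) : Int.ofNat m = (m : Int) := rfl

lemma pvTbCast (m : Nat) (k : Nat) : ((m : Nat) : Int).testBit k = m.testBit k := rfl

lemma pvToNatOfNat (m : Nat) : (Int.ofNat m).toNat = m := rfl

lemma pvOfNatNonneg (p : Nat) : (0 : Int) ≤ Int.ofNat p := by
  rw [pvOfNatCast]; exact Int.natCast_nonneg p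

lemma pvNegSuccNeg (p : Nat) : ¬ (0 : Int) ≤ Int.negSucc p := by
  rw [Int.negSucc_eq]; omega

lemma pvToNatNegSucc (p : Nat) : (-(Int.negSucc p) - 1).toNat = p := by
  rw [Int.negSucc_eq]; omega

-- m - (m &&& n) is bitwise difference
lemma pvNatSubAnd : ∀ m n : Nat, m - (m &&& n) = Nat.ldiff m n := by
  intro m
  induction m using Nat.strong_induction_on with
  | _ m IH =>
    intro n
    rcases Nat.eq_zero_or_pos m with h0 | hpos
    · subst h0
      have : Nat.ldiff 0 n = 0 :=
        Nat.eq_of_testBit_eq (fun i => by simp [Nat.testBit_ldiff])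
      simp [this]
    · have h2 : m / 2 < m := Nat.div_lt_self hpos (by norm_num)
      have IH2 := IH (m / 2) h2 (n / 2)
      have had : (m &&& n) / 2 = m / 2 &&& n / 2 := Nat.and_div_two
      have hld2 : Nat.ldiff m n / 2 = Nat.ldiff (m / 2) (n / 2) :=
        Nat.eq_of_testBit_eq (fun i => by
          simp [Nat.testBit_div_two, Nat.testBit_ldiff])
      have hle : m / 2 &&& n / 2 ≤ m / 2 := Nat.and_le_left
      have hA := Nat.testBit_and m n 0
      have hL := Nat.testBit_ldiff m n 0
      rw [Nat.testBit_zero, Nat.testBit_zero, Nat.testBit_zero] at hA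
      rw [Nat.testBit_zero, Nat.testBit_zero, Nat.testBit_zero] at hL
      rcases Nat.mod_two_eq_zero_or_one m with hm | hm <;>
        rcases Nat.mod_two_eq_zero_or_one n with hn | hn <;>
          rcases Nat.mod_two_eq_zero_or_one (m &&& n) with hx | hx <;>
            rcases Nat.mod_two_eq_zero_or_one (Nat.ldiff m n) with hl | hl <;>
              simp only [hm, hn, hx, hl] at hA hL <;> simp at hA hL <;> omega

-- the PySem bit operations act bitwise
lemma pvTbBand (a b : Int) (k : Nat) :
    (PySem.Int.band a b).testBit k = (a.testBit k && b.testBit k) := by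
  rcases a with m | m <;> rcases b with n | n <;>
    simp only [PySem.Int.band, pvOfNatNonneg, pvNegSuccNeg, pvToNatNegSucc, pvToNatOfNat,
      if_true, if_false]
  · rw [pvTbCast (m &&& n), pvTbCoe, pvTbCoe, Nat.testBit_and]
  · rw [pvNatSubAnd, pvTbCast (Nat.ldiff m n), pvTbCoe, pvTbNegSucc, Nat.testBit_ldiff]
  · rw [pvNatSubAnd, pvTbCast (Nat.ldiff n m), pvTbNegSucc, pvTbCoe, Nat.testBit_ldiff,
      Bool.and_comm]
  · rw [pvNegSuccCast, pvTbNegSucc, pvTbNegSucc, pvTbNegSucc, Nat.testBit_or]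
    cases m.testBit k <;> cases n.testBit k <;> rfl

lemma pvTbBor (a b : Int) (k : Nat) :
    (PySem.Int.bor a b).testBit k = (a.testBit k || b.testBit k) := by
  rcases a with m | m <;> rcases b with n | n <;>
    simp only [PySem.Int.bor, pvOfNatNonneg, pvNegSuccNeg, pvToNatNegSucc, pvToNatOfNat,
      if_true, if_false]
  · rw [pvTbCast (m ||| n), pvTbCoe, pvTbCoe, Nat.testBit_or]
  · rw [pvNatSubAnd, pvNegSuccCast, pvTbNegSucc, pvTbCoe, pvTbNegSucc, Nat.testBit_ldiff]
    cases m.testBit k <;> cases n.testBit k <;> rfl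
  · rw [pvNatSubAnd, pvNegSuccCast, pvTbNegSucc, pvTbNegSucc, pvTbCoe, Nat.testBit_ldiff]
    cases m.testBit k <;> cases n.testBit k <;> rfl
  · rw [pvNegSuccCast, pvTbNegSucc, pvTbNegSucc, pvTbNegSucc, Nat.testBit_and]
    cases m.testBit k <;> cases n.testBit k <;> rfl

lemma pvTbBxor (a b : Int) (k : Nat) :
    (PySem.Int.bxor a b).testBit k = xor (a.testBit k) (b.testBit k) := by
  rcases a with m | m <;> rcases b with n | n <;>
    simp only [PySem.Int.bxor, pvOfNatNonneg, pvNegSuccNeg, pvToNatNegSucc, pvToNatOfNat,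
      if_true, if_false]
  · rw [pvTbCast (m ^^^ n), pvTbCoe, pvTbCoe, Nat.testBit_xor]
  · rw [pvNegSuccCast, pvTbNegSucc, pvTbCoe, pvTbNegSucc, Nat.testBit_xor]
    cases m.testBit k <;> cases n.testBit k <;> rfl
  · rw [pvNegSuccCast, pvTbNegSucc, pvTbNegSucc, pvTbCoe, Nat.testBit_xor]
    cases m.testBit k <;> cases n.testBit k <;> rfl
  · rw [pvTbCast (m ^^^ n), pvTbNegSucc, pvTbNegSucc, Nat.testBit_xor]
    cases m.testBit k <;> cases n.testBit k <;> rfl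

lemma pvTbNot (a : Int) (k : Nat) : (Int.not a).testBit k = !(a.testBit k) := by
  rcases a with m | m
  · show (Int.negSucc m).testBit k = _
    rw [pvTbNegSucc, pvTbCoe]
  · show (Int.ofNat m).testBit k = _
    rw [pvTbCoe, pvTbNegSucc, Bool.not_not]

-- extensionality of Int by bits
lemma pvIntExt {a b : Int} (h : ∀ i, a.testBit i = b.testBit i) : a = b := by
  rcases a with m | m <;> rcases b with n | n
  · have : m = n := Nat.eq_of_testBit_eq (fun i => by
      have := h i; rwa [pvTbCoe, pvTbCoe] at this)
    rw [this]
  · exfalso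
    have hm : m < 2 ^ (m + n) :=
      lt_of_lt_of_le Nat.lt_two_pow_self (Nat.pow_le_pow_right (by norm_num) (Nat.le_add_right _ _))
    have hn : n < 2 ^ (m + n) :=
      lt_of_lt_of_le Nat.lt_two_pow_self (Nat.pow_le_pow_right (by norm_num) (Nat.le_add_left _ _))
    have := h (m + n)
    rw [pvTbCoe, pvTbNegSucc, Nat.testBit_lt_two_pow hm, Nat.testBit_lt_two_pow hn] at this
    exact Bool.false_ne_true this
  · exfalso
    have hm : m < 2 ^ (m + n) :=
      lt_of_lt_of_le Nat.lt_two_pow_self (Nat.pow_le_pow_right (by norm_num) (Nat.le_add_right _ _))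
    have hn : n < 2 ^ (m + n) :=
      lt_of_lt_of_le Nat.lt_two_pow_self (Nat.pow_le_pow_right (by norm_num) (Nat.le_add_left _ _))
    have := h (m + n)
    rw [pvTbCoe, pvTbNegSucc, Nat.testBit_lt_two_pow hm, Nat.testBit_lt_two_pow hn] at this
    exact Bool.false_ne_true this.symm
  · have : m = n := Nat.eq_of_testBit_eq (fun i => by
      have := h i; rw [pvTbNegSucc, pvTbNegSucc] at this
      exact Bool.not_inj this)
    rw [this]

-- ---- A-side: per-bit finite-state machine = count mod 5 ----
def pvBits (st : Int × Int × Int) (i : Nat) : Bool × Bool × Bool :=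
  (st.1.testBit i, st.2.1.testBit i, st.2.2.testBit i)

def pvEnc (r : Nat) : Bool × Bool × Bool := (r.testBit 0, r.testBit 1, r.testBit 2)

def pvStepB (s : Bool × Bool × Bool) (d : Bool) : Bool × Bool × Bool :=
  let c := xor s.2.2 (s.2.1 && s.1 && d)
  let b := xor s.2.1 (s.1 && d)
  let a := xor s.1 d
  let m := !(a && !b && c)
  (a && m, b && m, c && m)

lemma pvStepABits (st : Int × Int × Int) (num : Int) (i : Nat) :
    pvBits (pvStepA st num) i = pvStepB (pvBits st i) (num.testBit i) := by
  simp only [pvStepA, pvStepB, pvBits, pvTbBand, pvTbBxor, pvTbNot]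

lemma pvStepBEnc : ∀ (r : Fin 5) (d : Bool),
    pvStepB (pvEnc r.val) d = pvEnc ((r.val + cond d 1 0) % 5) := by decide

lemma pvEncOr : ∀ r : Fin 5,
    ((pvEnc r.val).1 || (pvEnc r.val).2.1 || (pvEnc r.val).2.2) = decide (r.val ≠ 0) := by decide

lemma pvFoldA (l : List Int) : ∀ (st : Int × Int × Int) (i : Nat) (r : Nat), r < 5 →
    pvBits st i = pvEnc r →
    pvBits (l.foldl pvStepA st) i = pvEnc ((r + l.countP (fun n => n.testBit i)) % 5) := by
  induction l with
  | nil =>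
    intro st i r hr h
    simpa [Nat.mod_eq_of_lt hr] using h
  | cons x l IH =>
    intro st i r hr h
    have hs : pvBits (pvStepA st x) i = pvEnc ((r + cond (x.testBit i) 1 0) % 5) := by
      rw [pvStepABits, h]; exact pvStepBEnc ⟨r, hr⟩ (x.testBit i)
    have hrec := IH (pvStepA st x) i _ (Nat.mod_lt _ (by norm_num)) hs
    rw [List.foldl_cons, hrec, List.countP_cons]
    congr 1
    cases hx : x.testBit i <;> simp <;> omega

lemma pvBitsInit (i : Nat) : pvBits ((0 : Int), (0 : Int), (0 : Int)) i = pvEnc 0 := by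
  have h0 : (0 : Int).testBit i = false := by
    rw [show (0 : Int) = Int.ofNat 0 from rfl, pvTbCoe, Nat.zero_testBit]
  simp [pvBits, pvEnc, h0]

lemma pvATb (nums : List Int) (i : Nat) :
    (singleNumber5 nums).testBit i = decide (nums.countP (fun n => n.testBit i) % 5 ≠ 0) := by
  have h := pvFoldA nums ((0 : Int), (0 : Int), (0 : Int)) i 0 (by norm_num) (pvBitsInit i)
  simp only [Nat.zero_add] at h
  have hlt : nums.countP (fun n => n.testBit i) % 5 < 5 := Nat.mod_lt _ (by norm_num)
  have horr := pvEncOr ⟨nums.countP (fun n => n.testBit i) % 5, hlt⟩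
  simp only [pvBits, Prod.ext_iff] at h
  simp only [singleNumber5, pvTbBor, h.1, h.2.1, h.2.2]
  rw [horr]

-- ---- B-side ----
lemma pvTbShr (n : Int) (s k : Nat) : (n >>> s).testBit k = n.testBit (s + k) := by
  rcases n with m | m
  · have h1 : (Int.ofNat m) >>> s = Int.ofNat (m >>> s) := by
      rw [pvOfNatCast, pvOfNatCast, Int.natCast_shiftRight]
    rw [h1, pvTbCoe, pvTbCoe, Nat.testBit_shiftRight]
  · rw [Int.negSucc_shiftRight, pvTbNegSucc, pvTbNegSucc, Nat.testBit_shiftRight]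

lemma pvBand1 (a : Int) : PySem.Int.band a 1 = if a.testBit 0 then 1 else 0 := by
  rw [PySem.Int.band_one, PySem.Int.mod_eq_emod_of_pos (by norm_num)]
  rcases a with m | m
  · rw [pvTbCoe, Nat.testBit_zero, pvOfNatCast]
    rcases Nat.mod_two_eq_zero_or_one m with h | h <;> simp [h] <;> omega
  · rw [pvTbNegSucc, Nat.testBit_zero, Int.negSucc_eq]
    rcases Nat.mod_two_eq_zero_or_one m with h | h <;> simp [h] <;> omega

lemma pvBitSumEq (nums : List Int) (i : Nat) :
    pvBitSum nums i = ((nums.countP (fun n => n.testBit i) : Nat) : Int) := by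
  unfold pvBitSum
  rw [show (nums.map (fun (n : Int) => PySem.Int.band (n >>> i) 1)) =
      (nums.map (fun n : Int => if (fun n : Int => n.testBit i) n = true then (1 : Int) else 0)) from
    List.map_congr_left (fun n _ => by
      rw [pvBand1, pvTbShr]
      simp)]
  exact PySem.List.sum_map_ite_one_zero _ _

lemma pvTbOneShl (s k : Nat) : ((1 : Int) <<< s).testBit k = decide (k = s) := by
  have h1 : ((1 : Int) <<< s) = Int.ofNat ((1 : Nat) <<< s) := by
    rw [pvOfNatCast, Int.natCast_shiftLeft]; norm_num
  rw [h1, pvTbCoe, Nat.testBit_shiftLeft]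
  by_cases h : k = s
  · subst h
    simp [Nat.testBit_zero]
  · by_cases h2 : s ≤ k
    · have hp : (2 : Nat) ^ 1 ≤ 2 ^ (k - s) :=
        Nat.pow_le_pow_right (by norm_num) (by omega)
      have h1lt : (1 : Nat) < 2 ^ (k - s) := by
        rw [pow_one] at hp; omega
      rw [Nat.testBit_lt_two_pow h1lt]
      simp [h2, h]
    · simp [h2, h]

lemma pvTbZero (k : Nat) : (0 : Int).testBit k = false := by
  rw [show (0 : Int) = Int.ofNat 0 from rfl, pvTbCoe, Nat.zero_testBit]

lemma pvResBits (nums : List Int) (K : Nat) (j : Nat) :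
    (((List.range K).foldl (pvResF nums) 0).testBit j) =
      (decide (j < K) && decide (nums.countP (fun n => n.testBit j) % 5 ≠ 0)) := by
  induction K with
  | zero => simp [pvTbZero]
  | succ K IH =>
    rw [List.range_succ, List.foldl_append, List.foldl_cons, List.foldl_nil]
    have hcond : (PySem.Int.mod (pvBitSum nums K) 5 ≠ 0) ↔
        (nums.countP (fun n => n.testBit K) % 5 ≠ 0) := by
      rw [pvBitSumEq, show ((5 : Int)) = ((5 : Nat) : Int) from rfl, PySem.Int.mod_natCast]
      omega
    set R := (List.range K).foldl (pvResF nums) 0 with hR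
    by_cases h : PySem.Int.mod (pvBitSum nums K) 5 ≠ 0
    · rw [show pvResF nums R K = PySem.Int.bor R ((1 : Int) <<< K) from by
        unfold pvResF; rw [if_pos h]]
      rw [pvTbBor, IH, pvTbOneShl]
      have hK : nums.countP (fun n => n.testBit K) % 5 ≠ 0 := hcond.mp h
      by_cases hj : j = K
      · subst hj; simp [hK]
      · have he : (j < K + 1) ↔ (j < K) := by omega
        simp [hj, he]
    · rw [show pvResF nums R K = R from by unfold pvResF; rw [if_neg h]]
      rw [IH]
      have hK : ¬ nums.countP (fun n => n.testBit K) % 5 ≠ 0 := fun hc => h (hcond.mpr hc)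
      by_cases hj : j = K
      · subst hj; simp [hK]
      · have he : (j < K + 1) ↔ (j < K) := by omega
        simp [he]

lemma pvNegSumEq (nums : List Int) :
    (nums.map (fun n => if n < 0 then (1 : Int) else 0)).sum =
      ((nums.countP (fun n => decide (n < 0)) : Nat) : Int) := by
  rw [show (nums.map (fun n => if n < 0 then (1 : Int) else 0)) =
      (nums.map (fun n : Int => if (fun n : Int => decide (n < 0)) n = true then (1 : Int) else 0)) from
    List.map_congr_left (fun n _ => by simp)]
  exact PySem.List.sum_map_ite_one_zero _ _

lemma pvTbNegShl (j : Nat) : ((-1 : Int) <<< 32).testBit j = decide (32 ≤ j) := by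
  have h1 : ((-1 : Int) <<< 32) = Int.negSucc (2 ^ 32 - 1) := by decide
  rw [h1, pvTbNegSucc, Nat.testBit_two_pow_sub_one]
  by_cases h : j < 32
  · have h2 : ¬ (32 ≤ j) := by omega
    simp [h, h2]
  · have h2 : 32 ≤ j := by omega
    simp [h, h2]

lemma pvBTb (nums : List Int) (j : Nat) :
    (singleNumber5_alt nums).testBit j =
      (if j < 32 then decide (nums.countP (fun n => n.testBit j) % 5 ≠ 0)
       else decide (nums.countP (fun n => decide (n < 0)) % 5 ≠ 0)) := by
  have hcond : (PySem.Int.mod ((nums.countP (fun n => decide (n < 0)) : Nat) : Int) 5 ≠ 0) ↔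
      (nums.countP (fun n => decide (n < 0)) % 5 ≠ 0) := by
    rw [show ((5 : Int)) = ((5 : Nat) : Int) from rfl, PySem.Int.mod_natCast]
    omega
  simp only [singleNumber5_alt, pvNegSumEq]
  by_cases h : PySem.Int.mod ((nums.countP (fun n => decide (n < 0)) : Nat) : Int) 5 ≠ 0
  · rw [if_pos h, pvTbBor, pvResBits, pvTbNegShl]
    by_cases hj : j < 32
    · simp [hj, show ¬ (32 ≤ j) by omega]
    · simp [hj, show (32 ≤ j) by omega, hcond.mp h]
  · rw [if_neg h, pvResBits]
    by_cases hj : j < 32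
    · simp [hj]
    · have hz : ¬ nums.countP (fun n => decide (n < 0)) % 5 ≠ 0 := fun hc => h (hcond.mpr hc)
      simp [hj, hz]

-- on the domain, every bit from position 32 on equals the sign
lemma pvSignBit (n : Int) (h1 : -2147483648 ≤ n) (h2 : n ≤ 2147483648) (j : Nat) (hj : 32 ≤ j) :
    n.testBit j = decide (n < 0) := by
  have hp : (2 : Nat) ^ 32 ≤ 2 ^ j := Nat.pow_le_pow_right (by norm_num) hj
  have hp' : (2 : Nat) ^ 32 = 4294967296 := by norm_num
  rcases n with m | m
  · rw [pvOfNatCast] at h1 h2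
    have hm : m < 2 ^ j := by omega
    rw [pvTbCoe, Nat.testBit_lt_two_pow hm]
    have : ¬ ((m : Int) < 0) := by omega
    simp [this]
  · rw [Int.negSucc_eq] at h1 h2
    have hm : m < 2 ^ j := by omega
    rw [pvTbNegSucc, Nat.testBit_lt_two_pow hm]
    have : Int.negSucc m < 0 := Int.negSucc_lt_zero m
    simp [this]

-- ===== VERDICT (by name: the statement is the Claim_ definition above) =====
theorem singleNumber5_spec : Claim_equal_singleNumber5 := by
  unfold Claim_equal_singleNumber5
  intro nums hdom
  unfold Spec_singleNumber5
  apply pvIntExt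
  intro j
  rw [pvATb, pvBTb]
  by_cases hj : j < 32
  · simp [hj]
  · simp only [hj, if_false]
    have hall : ∀ n ∈ nums, -2147483648 ≤ n ∧ n ≤ 2147483648 := by
      intro n hn
      have := List.all_eq_true.mp hdom n hn
      simpa [pvDomInt] using this
    have : nums.countP (fun n => n.testBit j) = nums.countP (fun n => decide (n < 0)) :=
      List.countP_congr (fun x hx => by
        rw [pvSignBit x (hall x hx).1 (hall x hx).2 j (by omega)])
    rw [this]
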